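-- pv_equiv track=rewrite | github.com/siikamiika/crypto-stuff | substitution/analyze_substitution_cipher.py | substitution_independent_representation
-- ===== SOURCE A (Python) =====
-- def substitution_independent_representation(text):
--     mapping = {}
--     out = []
--     sub = ord('A')
--     for char in text:
--         if char not in mapping:
--             mapping[char] = chr(sub)
--             sub += 1
--         out.append(mapping[char])
--     return ''.join(out)
-- ===== SOURCE B (Python) =====
-- def substitution_independent_representation(text):
--     return ''.join(chr(ord('A') + len(set(text[:text.index(c)]))) for c in text)
-- ===== Notes on version B (the rewrite author's own statement) =====
-- stated objective: alternative
-- what changed: Removes the relabeling table entirely: instead of building a char-to-letter mapping while emitting, each position's label is computed arithmetically as ord('A') plus the number of distinct characters in the prefix strictly before that character's first occurrence (len(set(text[:text.index(c)]))).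
import Mathlib
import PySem

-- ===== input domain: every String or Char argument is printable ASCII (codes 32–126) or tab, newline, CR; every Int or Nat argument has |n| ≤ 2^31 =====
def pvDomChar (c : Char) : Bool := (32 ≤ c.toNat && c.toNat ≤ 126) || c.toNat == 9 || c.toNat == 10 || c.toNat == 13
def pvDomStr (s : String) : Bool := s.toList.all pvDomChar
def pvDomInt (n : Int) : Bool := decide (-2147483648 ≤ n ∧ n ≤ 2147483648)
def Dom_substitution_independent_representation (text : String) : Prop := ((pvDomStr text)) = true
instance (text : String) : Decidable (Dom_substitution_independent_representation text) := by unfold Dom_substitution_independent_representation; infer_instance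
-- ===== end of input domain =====

-- B drops A's mapping table entirely: each position's label is computed arithmetically as
-- 'A' plus the number of distinct characters before that character's first occurrence
-- (objective: alternative). Equivalence of return values.

-- ===== PORT A =====
-- A's loop: state (mapping, out, sub); 'out.append(mapping[char])' is ported with
-- (get? …).getD ' ' — the key is always present at that point, so KeyError is impossible.
def pvStepA (st : PySem.Dict Char Char × List Char × Int) (char : Char) :
    PySem.Dict Char Char × List Char × Int :=
  match st with
  | (mapping, out, sub) =>
    if mapping.contains char = false then
      let mapping := mapping.insert char (Char.ofNat sub.toNat)
      let sub := sub + 1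
      (mapping, out ++ [(mapping.get? char).getD ' '], sub)
    else
      (mapping, out ++ [(mapping.get? char).getD ' '], sub)

def substitution_independent_representation (text : String) : String :=
  let st := text.toList.foldl pvStepA (PySem.Dict.empty, [], (65 : Int))
  String.mk st.2.1

-- ===== PORT B =====
-- text.index(c) never raises here (c is drawn from text); ported as (index? …).getD 0.
def substitution_independent_representation_alt (text : String) : String :=
  String.mk (text.toList.map (fun c =>
    Char.ofNat (65 + (PySem.Set.ofList (PySem.List.slice text.toList none
      (some (((PySem.List.index? text.toList c).getD 0 : Nat) : Int)))).length)))

-- ===== PRECONDITION & SPEC =====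
def Spec_substitution_independent_representation (text : String) (out : String) : Prop := out = substitution_independent_representation_alt text
instance (text : String) (out : String) : Decidable (Spec_substitution_independent_representation text out) := by unfold Spec_substitution_independent_representation; infer_instance

-- ===== CLAIM (what is proved, stated in full; the proofs are below) =====
def Claim_equal_substitution_independent_representation : Prop := ∀ (text : String), Dom_substitution_independent_representation text → Spec_substitution_independent_representation text (substitution_independent_representation text)

-- ===== LEMMAS AND PROOFS =====

-- The dict A builds after having seen first-appearance order o, expressed as a fresh-key insert loop.
def pvDictOf (o : List Char) : PySem.Dict Char Char :=
  (PySem.List.enumerate o 0).foldl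
    (fun d p => d.insert p.2 (Char.ofNat (65 + p.1.toNat))) PySem.Dict.empty

lemma pvDictOf_append (o : List Char) (c : Char) :
    pvDictOf (o ++ [c]) = (pvDictOf o).insert c (Char.ofNat (65 + o.length)) := by
  simp [pvDictOf, PySem.List.enumerate_append, List.foldl_append, PySem.List.enumerate]

lemma get?_pvDictOf (o : List Char) (ho : o.Nodup) (c : Char) :
    (pvDictOf o).get? c = (PySem.List.index? o c).map (fun i => Char.ofNat (65 + i)) := by
  induction o using List.reverseRecOn with
  | nil => simp [pvDictOf, PySem.List.enumerate, PySem.List.index?]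
  | append_singleton o x ih =>
    have hdisj := List.disjoint_of_nodup_append ho
    have hx : x ∉ o := fun h => hdisj h (List.mem_singleton_self x)
    have ho' : o.Nodup := ho.of_append_left
    rw [pvDictOf_append]
    by_cases hcx : c = x
    · subst hcx
      rw [PySem.Dict.get?_insert_self, PySem.List.index?_append_singleton_self o c hx]
      simp
    · rw [PySem.Dict.get?_insert_of_ne _ _ hcx, ih ho']
      by_cases hco : c ∈ o
      · rw [PySem.List.index?_append_of_mem [x] hco]
      · rw [(PySem.List.index?_eq_none_iff o c).mpr hco,
            (PySem.List.index?_eq_none_iff (o ++ [x]) c).mpr (by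
              intro h
              rcases List.mem_append.mp h with h | h
              · exact hco h
              · exact hcx (List.mem_singleton.mp h))]

lemma contains_pvDictOf (o : List Char) (ho : o.Nodup) (c : Char) :
    (pvDictOf o).contains c = decide (c ∈ o) := by
  rw [PySem.Dict.contains_eq_isSome_get?, get?_pvDictOf o ho c]
  cases h : PySem.List.index? o c with
  | none => simp [(PySem.List.index?_eq_none_iff o c).mp h]
  | some i =>
    have hm : c ∈ o := (PySem.List.index?_isSome_iff o c).mp (by rw [h]; rfl)
    simp [hm]

-- the first-appearance order extends on the right through the scan
lemma foldl_add_prefix (l o : List Char) :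
    ∃ t, l.foldl PySem.Set.add o = o ++ t := by
  induction l generalizing o with
  | nil => exact ⟨[], by simp⟩
  | cons c l ih =>
    by_cases hc : c ∈ o
    · simpa [List.foldl_cons, PySem.Set.add_of_mem hc] using ih o
    · obtain ⟨t, ht⟩ := ih (o ++ [c])
      exact ⟨c :: t, by simp [List.foldl_cons, PySem.Set.add_of_not_mem hc, ht]⟩

lemma index?_foldl_add_of_mem (l o : List Char) (c : Char) (hc : c ∈ o) :
    PySem.List.index? (l.foldl PySem.Set.add o) c = PySem.List.index? o c := by
  obtain ⟨t, ht⟩ := foldl_add_prefix l o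
  rw [ht, PySem.List.index?_append_of_mem t hc]

-- A's loop, started after seen-order o, emits labels indexed into the final first-appearance order.
lemma pvLoop_eq (l : List Char) : ∀ (o out : List Char), o.Nodup →
    (l.foldl pvStepA (pvDictOf o, out, 65 + (o.length : Int))).2.1
      = out ++ l.map (fun c =>
          Char.ofNat (65 + ((PySem.List.index? (l.foldl PySem.Set.add o) c).getD 0))) := by
  induction l with
  | nil => intro o out _; simp
  | cons c l ih =>
    intro o out ho
    by_cases hc : c ∈ o
    · have hcont : (pvDictOf o).contains c = true := by
        rw [contains_pvDictOf o ho]; simpa using hc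
      obtain ⟨i, hi⟩ := Option.isSome_iff_exists.mp ((PySem.List.index?_isSome_iff o c).mpr hc)
      have hget : (pvDictOf o).get? c = some (Char.ofNat (65 + i)) := by
        rw [get?_pvDictOf o ho c, hi]; rfl
      have hstep : pvStepA (pvDictOf o, out, 65 + (o.length : Int)) c
          = (pvDictOf o, out ++ [Char.ofNat (65 + i)], 65 + (o.length : Int)) := by
        simp [pvStepA, hcont, hget]
      rw [List.foldl_cons, hstep, ih o _ ho]
      simp only [List.foldl_cons, PySem.Set.add_of_mem hc, List.map_cons,
        index?_foldl_add_of_mem l o c hc, hi, Option.getD_some]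
      simp
    · have hcont : (pvDictOf o).contains c = false := by
        rw [contains_pvDictOf o ho]; simpa using hc
      have hsub : ((65 : Int) + (o.length : Int)).toNat = 65 + o.length := by omega
      have hins : (pvDictOf o).insert c (Char.ofNat ((65 + (o.length : Int)).toNat))
          = pvDictOf (o ++ [c]) := by
        rw [pvDictOf_append, hsub]
      have hgetc : (pvDictOf (o ++ [c])).get? c = some (Char.ofNat (65 + o.length)) := by
        rw [← hins, hsub, PySem.Dict.get?_insert_self]
      have hstep : pvStepA (pvDictOf o, out, 65 + (o.length : Int)) c
          = (pvDictOf (o ++ [c]), out ++ [Char.ofNat (65 + o.length)],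
             65 + ((o ++ [c]).length : Int)) := by
        simp [pvStepA, hcont, hins, hgetc]
        ring
      have hnod : (o ++ [c]).Nodup := by
        refine List.Nodup.append ho (List.nodup_singleton c) ?_
        intro a ha hb
        rw [List.mem_singleton.mp hb] at ha
        exact hc ha
      have hidx : PySem.List.index? (l.foldl PySem.Set.add (o ++ [c])) c
          = some o.length := by
        obtain ⟨t, ht⟩ := foldl_add_prefix l (o ++ [c])
        rw [ht, PySem.List.index?_append_of_mem t (by simp),
            PySem.List.index?_append_singleton_self o c hc]
      rw [List.foldl_cons, hstep, ih (o ++ [c]) _ hnod]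
      simp only [List.foldl_cons, PySem.Set.add_of_not_mem hc, List.map_cons, hidx,
        Option.getD_some]
      simp

-- B's label for c (distinct chars before c's first occurrence) IS c's index in the
-- first-appearance order.
lemma pvLabel_eq (l : List Char) (c : Char) (hc : c ∈ l) :
    PySem.List.index? (PySem.Set.ofList l) c
      = some (PySem.Set.ofList (l.take ((PySem.List.index? l c).getD 0))).length := by
  obtain ⟨n, hn⟩ := Option.isSome_iff_exists.mp ((PySem.List.index?_isSome_iff l c).mpr hc)
  obtain ⟨pre, suf, hl, hlen, hpre⟩ := (PySem.List.index?_eq_some_iff l c n).mp hn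
  have hpre' : c ∉ PySem.Set.ofList pre := by
    rw [PySem.Set.mem_ofList]; exact hpre
  have htake : l.take ((PySem.List.index? l c).getD 0) = pre := by
    rw [hn, Option.getD_some, hl, ← hlen, List.take_left]
  have hofl : PySem.Set.ofList l
      = (PySem.Set.ofList pre ++ [c])
        ++ (PySem.Set.ofList suf).filter (fun y => !(PySem.Set.contains (PySem.Set.ofList pre ++ [c]) y)) := by
    have h1 : PySem.Set.ofList (pre ++ [c]) = PySem.Set.ofList pre ++ [c] := by
      rw [PySem.Set.ofList_append_singleton, PySem.Set.add_of_not_mem hpre']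
    calc PySem.Set.ofList l
        = PySem.Set.ofList ((pre ++ [c]) ++ suf) := by rw [hl]; simp
      _ = PySem.Set.update (PySem.Set.ofList (pre ++ [c])) suf := PySem.Set.ofList_append _ _
      _ = _ := by rw [h1, PySem.Set.update_eq_append_filter]
  rw [hofl, PySem.List.index?_append_of_mem _ (by simp),
      PySem.List.index?_append_singleton_self _ c hpre', htake]

-- ===== VERDICT (by name: the statement is the Claim_ definition above) =====
theorem substitution_independent_representation_spec : Claim_equal_substitution_independent_representation := by
  intro text _
  unfold Spec_substitution_independent_representation
  unfold substitution_independent_representation substitution_independent_representation_alt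
  have h0 : pvDictOf [] = PySem.Dict.empty := by
    simp [pvDictOf, PySem.List.enumerate]
  have key := pvLoop_eq text.toList [] [] List.nodup_nil
  rw [h0] at key
  norm_num at key
  simp only []
  rw [key]
  congr 1
  apply List.map_congr_left
  intro c hc
  rw [PySem.List.slice_to_natCast, ← PySem.Set.ofList_eq_foldl,
      ← PySem.List.index?_eq_idxOf?, pvLabel_eq text.toList c hc, Option.getD_some]
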